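-- pv_equiv track=rewrite | github.com/Ifrel/Mes-Projets-Scolaires | L2_S4_LOGIQUE/code/prototype.py | poss_avec_1_var
-- ===== SOURCE A (Python) =====
-- def poss_avec_1_var(contrainte: list, var_liste: list) -> list[list[int]]:
--     """
--     Renvoie une liste de toutes les possibilités pour une valeur dans contrainte
--
--     ARGUMENTS
--     - contraintes : liste contenant les contraintes
--     """
--
--     resultat = []
--
--     # Si la contrainte est nulle, il suffit d'inverser le signe de tous les éléments de var_liste
--     if contrainte[0] == 0:
--         resultat.append([-v for v in var_liste])
--         return resultat
--
--     # Si la contrainte n'est pas nulle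
--     for k in range(len(var_liste)):
--         poss = []
--         n = k
--         # Vérifie que la contrainte peut être satisfaite avec les éléments restants dans var_liste
--         if (n + contrainte[0]) <= len(var_liste):
--             # Ajoute les éléments négatifs avant la séquence de la contrainte
--             for i in range(n):
--                 poss.append(-var_liste[i])
--
--             # Ajoute la séquence de la contrainte
--             for _ in range(contrainte[0]):
--                 poss.append(var_liste[n])
--                 n += 1
--
--             # Ajoute les éléments négatifs après la séquence de la contrainte
--             for _ in range(len(var_liste) - contrainte[0] - k):
--                 poss.append(-var_liste[n])
--                 n += 1
--
--             resultat.append(poss)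
--
--     return resultat
-- ===== SOURCE B (Python) =====
-- def poss_avec_1_var(contrainte: list, var_liste: list) -> list[list[int]]:
--     c = contrainte[0]
--     neg = [-v for v in var_liste]
--     if c == 0:
--         return [neg]
--     n = len(var_liste)
--     return [neg[:k] + var_liste[k:k + c] + neg[k + c:]
--             for k in range(n) if k + c <= n]
-- ===== Notes on version B (the rewrite author's own statement) =====
-- stated objective: simpler
-- what changed: B replaces A's three index-cursor append loops per row with one precomputed negated list and slice concatenation (neg[:k] + var_liste[k:k+c] + neg[k+c:]) inside a single comprehension.
import Mathlib
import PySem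

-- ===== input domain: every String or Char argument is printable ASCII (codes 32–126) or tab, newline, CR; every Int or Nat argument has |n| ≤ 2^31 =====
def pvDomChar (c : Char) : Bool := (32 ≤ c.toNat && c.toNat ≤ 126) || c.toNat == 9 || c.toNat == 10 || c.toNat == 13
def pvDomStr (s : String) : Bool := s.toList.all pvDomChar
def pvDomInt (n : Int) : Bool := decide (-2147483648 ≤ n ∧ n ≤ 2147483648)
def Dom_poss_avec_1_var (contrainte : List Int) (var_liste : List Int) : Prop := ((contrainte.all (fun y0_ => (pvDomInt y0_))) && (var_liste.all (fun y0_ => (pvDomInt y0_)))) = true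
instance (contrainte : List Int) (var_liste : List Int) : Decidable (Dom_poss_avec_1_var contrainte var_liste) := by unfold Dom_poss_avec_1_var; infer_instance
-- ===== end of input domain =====

-- B builds each row by slice concatenation over a precomputed negated list instead of A's
-- three index-cursor append loops (objective: simpler; same return value on Pre_).

-- ===== PORT A =====
-- contrainte[0] is PySem.List.pyGetD (Python raises on empty contrainte; excluded by Pre_),
-- var_liste[i] likewise (out-of-range only when contrainte[0] < 0; excluded by Pre_).
def poss_avec_1_var (contrainte : List Int) (var_liste : List Int) : List (List Int) :=
  let c := PySem.List.pyGetD contrainte 0 0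
  if c = 0 then [var_liste.map (fun v => -v)]
  else
    (PySem.List.pyRange 0 (var_liste.length : Int) 1).foldl (fun resultat k =>
      if k + c ≤ (var_liste.length : Int) then
        -- for i in range(n): poss.append(-var_liste[i])
        let poss1 := (PySem.List.pyRange 0 k 1).foldl
          (fun poss i => poss ++ [-(PySem.List.pyGetD var_liste i 0)]) ([] : List Int)
        -- for _ in range(contrainte[0]): poss.append(var_liste[n]); n += 1
        let st2 := (PySem.List.pyRange 0 c 1).foldl
          (fun (st : List Int × Int) _ => (st.1 ++ [PySem.List.pyGetD var_liste st.2 0], st.2 + 1))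
          (poss1, k)
        -- for _ in range(len(var_liste) - contrainte[0] - k): poss.append(-var_liste[n]); n += 1
        let st3 := (PySem.List.pyRange 0 ((var_liste.length : Int) - c - k) 1).foldl
          (fun (st : List Int × Int) _ => (st.1 ++ [-(PySem.List.pyGetD var_liste st.2 0)], st.2 + 1))
          st2
        resultat ++ [st3.1]
      else resultat) []

-- ===== PORT B =====
def poss_avec_1_var_alt (contrainte : List Int) (var_liste : List Int) : List (List Int) :=
  let c := PySem.List.pyGetD contrainte 0 0
  let neg := var_liste.map (fun v => -v)
  if c = 0 then [neg]
  else
    let n := (var_liste.length : Int)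
    (((PySem.List.pyRange 0 n 1).filter (fun k => decide (k + c ≤ n))).map (fun k =>
      PySem.List.slice neg none (some k)
        ++ PySem.List.slice var_liste (some k) (some (k + c))
        ++ PySem.List.slice neg (some (k + c)) none))

-- ===== PRECONDITION & SPEC =====
-- A raises IndexError on empty contrainte, and on a negative contrainte[0] with nonempty
-- var_liste (its third loop runs past the end of var_liste); exactly those are excluded.
def Pre_poss_avec_1_var (contrainte : List Int) (var_liste : List Int) : Prop :=
  contrainte ≠ [] ∧ (0 ≤ contrainte.headI ∨ var_liste = [])
instance (contrainte : List Int) (var_liste : List Int) : Decidable (Pre_poss_avec_1_var contrainte var_liste) := by unfold Pre_poss_avec_1_var; infer_instance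
def pvWitness_poss_avec_1_var : List Int × List Int := ([2], [1, 2, 3])

def Spec_poss_avec_1_var (contrainte : List Int) (var_liste : List Int) (out : List (List Int)) : Prop := out = poss_avec_1_var_alt contrainte var_liste
instance (contrainte : List Int) (var_liste : List Int) (out : List (List Int)) : Decidable (Spec_poss_avec_1_var contrainte var_liste out) := by unfold Spec_poss_avec_1_var; infer_instance

-- ===== CLAIM (what is proved, stated in full; the proofs are below) =====
def Claim_equal_poss_avec_1_var : Prop := ∀ (contrainte : List Int) (var_liste : List Int), Dom_poss_avec_1_var contrainte var_liste → Pre_poss_avec_1_var contrainte var_liste → Spec_poss_avec_1_var contrainte var_liste (poss_avec_1_var contrainte var_liste)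

-- ===== LEMMAS AND PROOFS =====

-- A range-of-indices map equals the corresponding drop/take segment.
theorem map_pyGetD_pyRange_seg (xs : List Int) (a b : Int) (d : Int)
    (h0 : 0 ≤ a) (hab : a ≤ b) (hb : b ≤ (xs.length : Int)) :
    (PySem.List.pyRange a b 1).map (fun i => PySem.List.pyGetD xs i d)
      = (xs.drop a.toNat).take (b.toNat - a.toNat) := by
  apply List.ext_getElem
  · simp [PySem.List.length_pyRange_one]
    omega
  · intro j hj hj'
    have hjr : j < (PySem.List.pyRange a b 1).length := by simpa using hj
    have hjn : j < (b - a).toNat := by rwa [PySem.List.length_pyRange_one] at hjr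
    rw [List.getElem_map, PySem.List.getElem_pyRange_one a b j hjr,
        PySem.List.pyGetD_eq_getElem xs d (by omega) (by omega)]
    rw [List.getElem_take, List.getElem_drop]
    congr 1
    omega

-- A's counter loop: fold m steps appending g of a running counter.
theorem foldl_counter (g : Int → Int) (m : Nat) :
    ∀ (acc : List Int) (n0 : Int),
    (PySem.List.pyRange 0 (m : Int) 1).foldl
        (fun (st : List Int × Int) _ => (st.1 ++ [g st.2], st.2 + 1)) (acc, n0)
      = (acc ++ (PySem.List.pyRange n0 (n0 + m) 1).map g, n0 + m) := by
  induction m with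
  | zero =>
    intro acc n0
    simp only [Nat.cast_zero, add_zero]
    rw [PySem.List.pyRange_one_eq_nil (le_refl (0:Int)), PySem.List.pyRange_one_eq_nil (le_refl n0)]
    simp
  | succ m ih =>
    intro acc n0
    rw [show ((m + 1 : Nat) : Int) = (m : Int) + 1 by omega,
        PySem.List.pyRange_one_succ_right (by omega : (0:Int) ≤ (m : Int)),
        List.foldl_append]
    rw [ih acc n0]
    simp only [List.foldl_cons, List.foldl_nil]
    rw [show n0 + ((m : Int) + 1) = (n0 + (m:Int)) + 1 by ring,
        PySem.List.pyRange_one_succ_right (by omega : n0 ≤ n0 + (m : Int))]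
    simp

-- One row of A equals one row of B (0 < c, 0 ≤ k, k + c ≤ len).
theorem row_eq (var_liste : List Int) (c k : Int)
    (hc : 0 < c) (hk : 0 ≤ k) (hkc : k + c ≤ (var_liste.length : Int)) :
    ((PySem.List.pyRange 0 ((var_liste.length : Int) - c - k) 1).foldl
        (fun (st : List Int × Int) _ => (st.1 ++ [-(PySem.List.pyGetD var_liste st.2 0)], st.2 + 1))
        ((PySem.List.pyRange 0 c 1).foldl
          (fun (st : List Int × Int) _ => (st.1 ++ [PySem.List.pyGetD var_liste st.2 0], st.2 + 1))
          ((PySem.List.pyRange 0 k 1).foldl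
            (fun poss i => poss ++ [-(PySem.List.pyGetD var_liste i 0)]) ([] : List Int), k))).1
      = PySem.List.slice (var_liste.map (fun v => -v)) none (some k)
        ++ PySem.List.slice var_liste (some k) (some (k + c))
        ++ PySem.List.slice (var_liste.map (fun v => -v)) (some (k + c)) none := by
  obtain ⟨cn, rfl⟩ : ∃ cn : Nat, c = (cn : Int) := ⟨c.toNat, by omega⟩
  rw [PySem.List.foldl_append_singleton_eq_map (fun i => -(PySem.List.pyGetD var_liste i 0))]
  rw [foldl_counter (fun x => PySem.List.pyGetD var_liste x 0) cn]
  rw [show ((var_liste.length : Int) - (cn : Int) - k)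
        = ((((var_liste.length : Int) - (cn : Int) - k).toNat : Nat) : Int) from by omega]
  rw [foldl_counter (fun x => -(PySem.List.pyGetD var_liste x 0))
        (((var_liste.length : Int) - (cn : Int) - k).toNat)]
  simp only [List.nil_append]
  congr 1
  case e_a =>
   congr 1
   · -- negated prefix
     calc (PySem.List.pyRange 0 k 1).map (fun i => -(PySem.List.pyGetD var_liste i 0))
         = ((PySem.List.pyRange 0 k 1).map (fun i => PySem.List.pyGetD var_liste i 0)).map (fun x => -x) := by
           rw [List.map_map]; rfl
       _ = ((var_liste.drop (0:Int).toNat).take (k.toNat - (0:Int).toNat)).map (fun x => -x) := by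
           rw [map_pyGetD_pyRange_seg var_liste 0 k 0 (le_refl 0) hk (by omega)]
       _ = PySem.List.slice (var_liste.map (fun v => -v)) none (some k) := by
           rw [PySem.List.slice_to _ hk]
           simp [List.map_take]
   · -- middle segment
     rw [map_pyGetD_pyRange_seg var_liste k (k + (cn : Int)) 0 hk (by omega) (by omega),
         PySem.List.slice_toNat var_liste hk (by omega)]
  · -- negated suffix
    rw [show k + (cn : Int) + ((((var_liste.length : Int) - (cn : Int) - k).toNat : Nat) : Int)
          = (var_liste.length : Int) from by omega]
    calc (PySem.List.pyRange (k + (cn : Int)) (var_liste.length : Int) 1).map (fun i => -(PySem.List.pyGetD var_liste i 0))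
        = ((PySem.List.pyRange (k + (cn : Int)) (var_liste.length : Int) 1).map (fun i => PySem.List.pyGetD var_liste i 0)).map (fun x => -x) := by
          rw [List.map_map]; rfl
      _ = ((var_liste.drop (k + (cn : Int)).toNat).take ((var_liste.length : Int).toNat - (k + (cn : Int)).toNat)).map (fun x => -x) := by
          rw [map_pyGetD_pyRange_seg var_liste (k + (cn : Int)) (var_liste.length : Int) 0 (by omega) (by omega) (le_refl _)]
      _ = PySem.List.slice (var_liste.map (fun v => -v)) (some (k + (cn : Int))) none := by
          rw [PySem.List.slice_from _ (by omega : (0:Int) ≤ k + (cn : Int))]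
          rw [List.map_take, List.map_drop]
          apply List.take_of_length_le
          simp

-- An append-if fold over a list equals map-over-filter when the row functions agree on the kept elements.
theorem foldl_if_eq_map_filter (P : Int → Prop) [DecidablePred P] (f g : Int → List Int)
    (l : List Int) (hfg : ∀ k ∈ l, P k → f k = g k) :
    ∀ (acc : List (List Int)),
    l.foldl (fun acc k => if P k then acc ++ [f k] else acc) acc
      = acc ++ (l.filter (fun k => decide (P k))).map g := by
  induction l with
  | nil => intro acc; simp
  | cons x t ih =>
    intro acc
    have ih' := ih (fun k hk => hfg k (List.mem_cons_of_mem x hk))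
    by_cases hx : P x
    · simp only [List.foldl_cons, if_pos hx, List.filter_cons, decide_eq_true hx]
      rw [ih', hfg x (List.mem_cons_self) hx]
      simp
    · simp only [List.foldl_cons, if_neg hx, List.filter_cons]
      rw [ih']
      simp [hx]

-- ===== VERDICT (by name: the statement is the Claim_ definition above) =====
theorem poss_avec_1_var_spec : Claim_equal_poss_avec_1_var := by
  intro contrainte var_liste _ hpre
  unfold Spec_poss_avec_1_var poss_avec_1_var poss_avec_1_var_alt
  obtain ⟨hne, hc⟩ := hpre
  by_cases h0 : PySem.List.pyGetD contrainte 0 0 = 0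
  · simp [h0]
  · simp only [if_neg h0]
    set c := PySem.List.pyGetD contrainte 0 0 with hcdef
    have hhead : c = contrainte.headI := by
      cases contrainte with
      | nil => exact absurd rfl hne
      | cons a t => simp [hcdef, PySem.List.pyGetD_zero_cons]
    rcases hc with hcnn | hnil
    · have hcpos : 0 < c := by rw [hhead]; omega
      rw [foldl_if_eq_map_filter (fun k => k + c ≤ (var_liste.length : Int))
            _ _ _ (fun k hk hkc => by
              have hk' := (PySem.List.mem_pyRange_one).1 hk
              exact row_eq var_liste c k hcpos hk'.1 hkc)]
      simp
    · subst hnil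
      simp [PySem.List.pyRange_one_eq_nil (le_refl (0:Int))]
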